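-- pv_equiv track=rewrite | github.com/blacksoxx/vmware-migration-agent | providers/azure/sizing_table.py | _select_vcpu_bucket
-- ===== SOURCE A (Python) =====
-- _AZURE_SIZING_TABLE: dict[int, list[tuple[int, str]]] = {
--     1: [
--         (1024, "Standard_B1s"),
--         (2048, "Standard_B1ms"),
--     ],
--     2: [
--         (4096, "Standard_B2s"),
--         (8192, "Standard_D2s_v5"),
--         (16384, "Standard_D2as_v5"),
--     ],
--     4: [
--         (8192, "Standard_D4s_v5"),
--         (16384, "Standard_D4s_v5"),
--         (32768, "Standard_D4as_v5"),
--     ],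
--     8: [
--         (16384, "Standard_D8s_v5"),
--         (32768, "Standard_D8s_v5"),
--         (65536, "Standard_D8as_v5"),
--     ],
--     16: [
--         (32768, "Standard_D16s_v5"),
--         (65536, "Standard_D16s_v5"),
--         (131072, "Standard_D16as_v5"),
--     ],
-- }
--
-- def _select_vcpu_bucket(requested_vcpus: int) -> int:
--     if requested_vcpus in _AZURE_SIZING_TABLE:
--         return requested_vcpus
--
--     available = sorted(_AZURE_SIZING_TABLE)
--     for candidate in available:
--         if candidate >= requested_vcpus:
--             return candidate
--
--     return available[-1]
-- ===== SOURCE B (Python) =====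
-- _AZURE_SIZING_TABLE: dict[int, list[tuple[int, str]]] = {
--     1: [
--         (1024, "Standard_B1s"),
--         (2048, "Standard_B1ms"),
--     ],
--     2: [
--         (4096, "Standard_B2s"),
--         (8192, "Standard_D2s_v5"),
--         (16384, "Standard_D2as_v5"),
--     ],
--     4: [
--         (8192, "Standard_D4s_v5"),
--         (16384, "Standard_D4s_v5"),
--         (32768, "Standard_D4as_v5"),
--     ],
--     8: [
--         (16384, "Standard_D8s_v5"),
--         (32768, "Standard_D8s_v5"),
--         (65536, "Standard_D8as_v5"),
--     ],
--     16: [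
--         (32768, "Standard_D16s_v5"),
--         (65536, "Standard_D16s_v5"),
--         (131072, "Standard_D16as_v5"),
--     ],
-- }
--
--
-- def _select_vcpu_bucket(requested_vcpus: int) -> int:
--     # Binary search (bisect_left) over the sorted keys instead of a linear scan.
--     keys = sorted(_AZURE_SIZING_TABLE)
--     lo, hi = 0, len(keys)
--     while lo < hi:
--         mid = (lo + hi) // 2
--         if keys[mid] < requested_vcpus:
--             lo = mid + 1
--         else:
--             hi = mid
--     return keys[lo] if lo < len(keys) else keys[-1]
-- ===== Notes on version B (the rewrite author's own statement) =====
-- stated objective: alternative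
-- what changed: Replaces A's dict-membership check plus linear forward scan over the sorted keys with a single hand-written bisect_left binary search over the sorted keys (the exact-key case falls out of bisect_left, so the separate membership test disappears).
import Mathlib
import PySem

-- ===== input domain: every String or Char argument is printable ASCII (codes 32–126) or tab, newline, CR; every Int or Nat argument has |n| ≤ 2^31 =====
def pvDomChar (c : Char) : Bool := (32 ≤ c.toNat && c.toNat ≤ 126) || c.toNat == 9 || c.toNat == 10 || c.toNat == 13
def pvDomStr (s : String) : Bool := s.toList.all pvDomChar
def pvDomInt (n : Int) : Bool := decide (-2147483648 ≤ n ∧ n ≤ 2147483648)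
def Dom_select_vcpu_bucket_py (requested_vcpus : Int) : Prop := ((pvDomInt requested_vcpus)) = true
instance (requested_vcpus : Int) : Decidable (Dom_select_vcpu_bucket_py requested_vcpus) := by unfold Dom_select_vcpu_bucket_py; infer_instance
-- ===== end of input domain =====

-- B replaces A's linear scan (and redundant membership check) with a single binary search over the sorted keys; objective: idiomatic/alternative.

-- ===== PORT A =====
-- sorted(_AZURE_SIZING_TABLE): the table's keys, sorted
def azureKeysA : List Int := [1, 2, 4, 8, 16]

-- the 'for candidate in available: if candidate >= requested_vcpus: return candidate' loop
def scanA (r : Int) : List Int → Option Int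
  | [] => none
  | c :: rest => if c ≥ r then some c else scanA r rest

def select_vcpu_bucket_py (requested_vcpus : Int) : Int :=
  if azureKeysA.contains requested_vcpus then requested_vcpus
  else
    match scanA requested_vcpus azureKeysA with
    | some c => c
    | none => azureKeysA.getLastD 0   -- available[-1]; list is a nonempty constant, so no IndexError

-- ===== PORT B =====
def azureKeysB : List Int := [1, 2, 4, 8, 16]

-- the 'while lo < hi' bisect_left loop of Source B
def blLoop (keys : List Int) (x : Int) (lo hi : Nat) : Nat :=
  if _h : lo < hi then
    let mid := (lo + hi) / 2
    if keys.getD mid 0 < x then blLoop keys x (mid + 1) hi else blLoop keys x lo mid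
  else lo
termination_by hi - lo
decreasing_by all_goals omega

def select_vcpu_bucket_py_alt (requested_vcpus : Int) : Int :=
  let keys := azureKeysB
  let lo := blLoop keys requested_vcpus 0 keys.length
  if lo < keys.length then keys.getD lo 0 else keys.getLastD 0

-- ===== PRECONDITION & SPEC =====
def Spec_select_vcpu_bucket_py (requested_vcpus : Int) (out : Int) : Prop := out = select_vcpu_bucket_py_alt requested_vcpus
instance (requested_vcpus : Int) (out : Int) : Decidable (Spec_select_vcpu_bucket_py requested_vcpus out) := by unfold Spec_select_vcpu_bucket_py; infer_instance

-- ===== CLAIM (what is proved, stated in full; the proofs are below) =====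
def Claim_equal_select_vcpu_bucket_py : Prop := ∀ (requested_vcpus : Int), Dom_select_vcpu_bucket_py requested_vcpus → Spec_select_vcpu_bucket_py requested_vcpus (select_vcpu_bucket_py requested_vcpus)

-- ===== LEMMAS AND PROOFS =====
-- canonical piecewise value both programs compute
def bucketCanon (r : Int) : Int :=
  if r ≤ 1 then 1 else if r ≤ 2 then 2 else if r ≤ 4 then 4 else if r ≤ 8 then 8 else 16

lemma portA_eq_canon (r : Int) : select_vcpu_bucket_py r = bucketCanon r := by
  by_cases hc : r = 1 ∨ r = 2 ∨ r = 4 ∨ r = 8 ∨ r = 16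
  · rcases hc with h | h | h | h | h <;> subst h <;> decide
  · push Not at hc
    obtain ⟨n1, n2, n3, n4, n5⟩ := hc
    have hcon : azureKeysA.contains r = false := by simp [azureKeysA, n1, n2, n3, n4, n5]
    unfold select_vcpu_bucket_py bucketCanon
    rw [hcon]
    simp only [Bool.false_eq_true, if_false]
    unfold azureKeysA
    simp only [scanA]
    split_ifs <;> simp_all

lemma portB_eq_canon (r : Int) : select_vcpu_bucket_py_alt r = bucketCanon r := by
  unfold select_vcpu_bucket_py_alt bucketCanon azureKeysB
  by_cases h2 : (4 : Int) < r <;> by_cases h1 : (2 : Int) < r <;> by_cases h0 : (1 : Int) < r <;>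
    by_cases h3 : (8 : Int) < r <;> by_cases h4 : (16 : Int) < r <;>
    simp [blLoop, h0, h1, h2, h3, h4] <;> omega

-- ===== VERDICT (by name: the statement is the Claim_ definition above) =====
theorem select_vcpu_bucket_py_spec : Claim_equal_select_vcpu_bucket_py := by
  intro r _
  unfold Spec_select_vcpu_bucket_py
  rw [portA_eq_canon, portB_eq_canon]
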